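-- pv_equiv track=rewrite | github.com/svetak56/2021-python | ИС-32/Осминин Владислав Сергеевич/1laba.py | genfactorial
-- ===== SOURCE A (Python) =====
-- def genfactorial(x):
--     y = 1
--     for i in range(x):
--         if i in (0, 1):
--             yield 1
--         else:
--             y = y*i
--             yield y
-- ===== SOURCE B (Python) =====
-- import math
--
-- def genfactorial(x):
--     for i in range(x):
--         yield math.factorial(i)
-- ===== Notes on version B (the rewrite author's own statement) =====
-- stated objective: idiomatic
-- what changed: B drops A's running-product accumulator and branch on i in (0,1), yielding math.factorial(i) directly for each i (A's accumulated y equals i! at every step).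
import Mathlib
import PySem

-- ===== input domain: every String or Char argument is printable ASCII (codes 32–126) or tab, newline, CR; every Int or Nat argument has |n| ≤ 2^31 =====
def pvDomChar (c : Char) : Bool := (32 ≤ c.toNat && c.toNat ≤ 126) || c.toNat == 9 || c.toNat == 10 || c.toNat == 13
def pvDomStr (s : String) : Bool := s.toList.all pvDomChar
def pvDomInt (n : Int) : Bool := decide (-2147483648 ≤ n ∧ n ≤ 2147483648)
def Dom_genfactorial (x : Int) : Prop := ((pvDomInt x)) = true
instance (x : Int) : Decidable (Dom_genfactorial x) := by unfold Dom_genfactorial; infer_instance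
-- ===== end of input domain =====

-- B replaces A's running-product accumulator by computing each term as factorial(i) directly (idiomatic).
-- ===== PORT A =====
-- loop body of A: branch on i in (0,1), else multiply the accumulator and emit it
def genfactorialStep (s : Int × List Int) (i : Int) : Int × List Int :=
  if i = 0 ∨ i = 1 then (s.1, s.2 ++ [1])
  else (s.1 * i, s.2 ++ [s.1 * i])

def genfactorial (x : Int) : List Int :=
  ((PySem.List.pyRange 0 x 1).foldl genfactorialStep (1, [])).2

-- ===== PORT B =====
-- math.factorial ported as Nat.factorial (range indices are nonnegative)
def genfactorial_alt (x : Int) : List Int :=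
  (PySem.List.pyRange 0 x 1).map (fun i => (Nat.factorial i.toNat : Int))

-- ===== PRECONDITION & SPEC =====
def Spec_genfactorial (x : Int) (out : List Int) : Prop := out = genfactorial_alt x
instance (x : Int) (out : List Int) : Decidable (Spec_genfactorial x out) := by unfold Spec_genfactorial; infer_instance

-- ===== CLAIM (what is proved, stated in full; the proofs are below) =====
def Claim_equal_genfactorial : Prop := ∀ (x : Int), Dom_genfactorial x → Spec_genfactorial x (genfactorial x)

-- ===== LEMMAS AND PROOFS =====
-- loop invariant: after processing range(n), y = (n-1)! and the emitted list is [0!, 1!, …, (n-1)!]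
lemma genfactorial_fold (n : Nat) :
    ((List.range n).map (fun k : Nat => (k : Int))).foldl genfactorialStep (1, []) =
      ((Nat.factorial (n - 1) : Int),
        (List.range n).map (fun k => (Nat.factorial k : Int))) := by
  induction n with
  | zero => simp [Nat.factorial]
  | succ m ih =>
      rw [List.range_succ, List.map_append, List.foldl_append, ih]
      simp only [List.map_cons, List.map_nil, List.foldl_cons, List.foldl_nil]
      match m with
      | 0 => simp [genfactorialStep, Nat.factorial]
      | 1 => simp [genfactorialStep, Nat.factorial]
      | (k + 2) =>
          have h1 : ¬ (((k + 2 : Nat) : Int) = 0 ∨ ((k + 2 : Nat) : Int) = 1) := by omega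
          simp only [genfactorialStep, h1, if_false, Prod.mk.injEq]
          constructor
          · show ((Nat.factorial (k + 2 - 1) : Int)) * ((k + 2 : Nat) : Int)
              = (Nat.factorial (k + 2 + 1 - 1) : Int)
            have h2 : Nat.factorial (k + 2) = (k + 2) * Nat.factorial (k + 1) :=
              Nat.factorial_succ (k + 1)
            push_cast [show k + 2 - 1 = k + 1 from rfl, show k + 2 + 1 - 1 = k + 2 from rfl, h2]
            ring
          · rw [List.range_succ]
            simp only [List.map_append, List.map_cons, List.map_nil, List.append_cancel_left_eq,
              List.cons.injEq, and_true]
            have h2 : Nat.factorial (k + 2) = (k + 2) * Nat.factorial (k + 1) :=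
              Nat.factorial_succ (k + 1)
            push_cast [show k + 2 - 1 = k + 1 from rfl, show k + 2 + 1 - 1 = k + 2 from rfl, h2]
            ring

-- ===== VERDICT (by name: the statement is the Claim_ definition above) =====
theorem genfactorial_spec : Claim_equal_genfactorial := by
  intro x _
  show genfactorial x = genfactorial_alt x
  unfold genfactorial genfactorial_alt
  rw [PySem.List.pyRange_one]
  simp only [sub_zero, zero_add]
  rw [show (List.range (x.toNat)).map (fun k : Nat => (k : Int)) = (List.range (x.toNat)).map (fun k : Nat => (k : Int)) from rfl, genfactorial_fold]
  simp
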